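-- pv_equiv track=rewrite | github.com/qixuema/mautils | qixuema/helpers.py | remove_third_underscore_section
-- ===== SOURCE A (Python) =====
-- def remove_third_underscore_section(original_string):
--     """
--     移除字符串中第三个下划线之后的部分。
--
--     参数:
--     original_string (str): 原始字符串。
--
--     返回:
--     str: 修改后的字符串。
--     """
--     # 找到所有下划线的位置
--     underscore_positions = [pos for pos, char in enumerate(original_string) if char == '_']
--
--     # 确保有足够的下划线来找到第三个和第四个
--     if len(underscore_positions) >= 3:
--         start = underscore_positions[2] + 1  # 第三个下划线后的第一个字符
--         end = underscore_positions[3] if len(underscore_positions) > 3 else None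
--
--         # 剔除指定位置的字符串
--         return original_string[:start] + original_string[end:]
--     else:
--         return original_string  # 不足够的下划线，保留原始字符串
-- ===== SOURCE B (Python) =====
-- def remove_third_underscore_section(original_string):
--     out = []
--     seen = 0
--     for ch in original_string:
--         if ch == '_':
--             seen += 1
--         if seen != 3 or ch == '_':
--             out.append(ch)
--     return ''.join(out)
-- ===== Notes on version B (the rewrite author's own statement) =====
-- stated objective: alternative
-- what changed: B replaces A's two-phase approach (collect all underscore positions into a list, then glue two slices) by a single left-to-right pass with an underscore counter that copies every character except those strictly between the third and fourth underscore.
-- intended difference: On strings containing exactly three underscores A computes end=None and original_string[end:] is the WHOLE string, so A returns the prefix through the third underscore with the entire original string appended again (e.g. '___' -> '______'), while B returns just the prefix through the third underscore ('___'), which is the intended 'remove the section after the third underscore'. — e.g. on remove_third_underscore_section("a_b_c_"): A returns "a_b_c_a_b_c_", B returns "a_b_c_"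
import Mathlib
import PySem

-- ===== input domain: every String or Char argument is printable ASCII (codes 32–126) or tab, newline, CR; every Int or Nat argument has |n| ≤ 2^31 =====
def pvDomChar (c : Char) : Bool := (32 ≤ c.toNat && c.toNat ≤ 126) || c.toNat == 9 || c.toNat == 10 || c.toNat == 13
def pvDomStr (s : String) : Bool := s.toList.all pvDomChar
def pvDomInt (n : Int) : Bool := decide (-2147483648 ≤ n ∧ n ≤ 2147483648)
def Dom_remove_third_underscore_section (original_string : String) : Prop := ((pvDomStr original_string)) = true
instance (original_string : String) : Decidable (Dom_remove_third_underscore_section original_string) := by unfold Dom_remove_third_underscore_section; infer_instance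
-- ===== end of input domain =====

-- B: one pass with an underscore counter instead of A's position list + slicing (alternative decomposition).
-- On strings with exactly three underscores A's `s[None:]` re-appends the whole string; B returns the intended value (see D_ below).

-- ===== PORT A =====
def remove_third_underscore_section (original_string : String) : String :=
  let s := original_string.toList
  -- underscore_positions = [pos for pos, char in enumerate(original_string) if char == '_']
  let underscore_positions : List Int :=
    ((PySem.List.enumerate s).filter (fun p => p.2 == '_')).map (fun p => p.1)
  if 3 ≤ underscore_positions.length then
    -- start = underscore_positions[2] + 1  (in range by the guard; default never used)
    let start : Int := PySem.List.pyGetD underscore_positions 2 0 + 1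
    -- end = underscore_positions[3] if len(underscore_positions) > 3 else None
    let stop : Option Int :=
      if 3 < underscore_positions.length then some (PySem.List.pyGetD underscore_positions 3 0) else none
    -- return original_string[:start] + original_string[end:]
    String.ofList (PySem.List.slice s none (some start) ++ PySem.List.slice s stop none)
  else
    original_string

-- ===== PORT B =====
def remove_third_underscore_section_alt (original_string : String) : String :=
  -- out = []; seen = 0; for ch in s: seen += (ch == '_'); keep ch unless seen == 3 and ch != '_'
  let r := original_string.toList.foldl
    (fun (st : List Char × Int) ch =>
      let seen := if ch = '_' then st.2 + 1 else st.2
      if seen ≠ 3 ∨ ch = '_' then (st.1 ++ [ch], seen) else (st.1, seen))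
    ([], 0)
  String.ofList r.1

-- ===== PRECONDITION & SPEC =====
-- On strings with exactly three underscores A returns the prefix through the third underscore with the WHOLE original
-- string appended again (end=None makes s[end:] the full string), while B returns just that prefix — the intended
-- removal of the section after the third underscore.
def D_remove_third_underscore_section (original_string : String) : Prop :=
  original_string.toList.count '_' = 3
instance (original_string : String) : Decidable (D_remove_third_underscore_section original_string) := by
  unfold D_remove_third_underscore_section; infer_instance

def Spec_remove_third_underscore_section (original_string : String) (out : String) : Prop :=
  ¬ D_remove_third_underscore_section original_string → out = remove_third_underscore_section_alt original_string
instance (original_string : String) (out : String) : Decidable (Spec_remove_third_underscore_section original_string out) := by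
  unfold Spec_remove_third_underscore_section; infer_instance

def pvDiffWitness_remove_third_underscore_section : String := "a_b_c_"
def pvDiffWitnessOut_remove_third_underscore_section : String × String := ("a_b_c_a_b_c_", "a_b_c_")

-- ===== CLAIM (what is proved, stated in full; the proofs are below) =====
def Claim_unchanged_remove_third_underscore_section : Prop := ∀ (original_string : String), Dom_remove_third_underscore_section original_string → Spec_remove_third_underscore_section original_string (remove_third_underscore_section original_string)
def Claim_changed_remove_third_underscore_section : Prop := Dom_remove_third_underscore_section (pvDiffWitness_remove_third_underscore_section) ∧ D_remove_third_underscore_section (pvDiffWitness_remove_third_underscore_section) ∧ remove_third_underscore_section (pvDiffWitness_remove_third_underscore_section) = pvDiffWitnessOut_remove_third_underscore_section.1 ∧ remove_third_underscore_section_alt (pvDiffWitness_remove_third_underscore_section) = pvDiffWitnessOut_remove_third_underscore_section.2 ∧ pvDiffWitnessOut_remove_third_underscore_section.1 ≠ pvDiffWitnessOut_remove_third_underscore_section.2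
def Claim_exact_remove_third_underscore_section : Prop := ∀ (original_string : String), Dom_remove_third_underscore_section original_string → D_remove_third_underscore_section original_string → remove_third_underscore_section original_string ≠ remove_third_underscore_section_alt original_string

-- ===== LEMMAS AND PROOFS =====

-- positions (as Nats) of '_' in a char list
def pvP : List Char → List Nat
  | [] => []
  | c :: cs => if c = '_' then 0 :: (pvP cs).map (· + 1) else (pvP cs).map (· + 1)

-- suffix starting at the first '_' ([] if none)
def pvFrom : List Char → List Char
  | [] => []
  | c :: cs => if c = '_' then c :: cs else pvFrom cs

-- everything up to and including the (n+1)-th underscore, then from the next underscore on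
def pvRem : Nat → List Char → List Char
  | _, [] => []
  | 0, c :: cs => if c = '_' then c :: pvFrom cs else c :: pvRem 0 cs
  | n+1, c :: cs => if c = '_' then c :: pvRem n cs else c :: pvRem (n+1) cs

-- what B's loop body keeps, starting from counter k
def pvKeep : Int → List Char → List Char
  | _, [] => []
  | k, c :: cs =>
      let k' := if c = '_' then k + 1 else k
      if k' ≠ 3 ∨ c = '_' then c :: pvKeep k' cs else pvKeep k' cs

theorem pvP_length (cs : List Char) : (pvP cs).length = cs.count '_' := by
  induction cs with
  | nil => rfl
  | cons c cs ih =>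
    simp [pvP, List.count_cons]
    split_ifs with h <;> simp [ih]

theorem pvenum_cons {α : Type} (x : α) (xs : List α) (st : Int) :
    PySem.List.enumerate (x :: xs) st = (st, x) :: PySem.List.enumerate xs (st + 1) := rfl

theorem pvUps_eq (cs : List Char) (st : Int) :
    ((PySem.List.enumerate cs st).filter (fun p => p.2 == '_')).map (fun p => p.1)
      = (pvP cs).map (fun (n : Nat) => st + (n : Int)) := by
  induction cs generalizing st with
  | nil => rfl
  | cons c cs ih =>
    rw [pvenum_cons, List.filter_cons]
    by_cases h : c = '_'
    · subst h
      rw [if_pos (by simp), List.map_cons, ih]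
      rw [show pvP ('_' :: cs) = 0 :: (pvP cs).map (· + 1) from rfl]
      rw [List.map_cons, List.map_map]
      refine congrArg₂ _ (by norm_num) (List.map_congr_left (fun n _ => ?_))
      simp only [Function.comp]
      push_cast; ring
    · rw [if_neg (by simp [h]), ih]
      rw [show pvP (c :: cs) = (pvP cs).map (· + 1) from (by rw [pvP]; exact if_neg h), List.map_map]
      refine List.map_congr_left (fun n _ => ?_)
      simp only [Function.comp]
      push_cast; ring

theorem pvGetD_map_cast (l : List Nat) (n : Nat) (h : n < l.length) :
    (l.map (fun (m : Nat) => (m : Int))).getD n 0 = (l.getD n 0 : Int) := by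
  rw [List.getD_eq_getElem?_getD, List.getElem?_map, List.getElem?_eq_getElem h,
      List.getD_eq_getElem?_getD, List.getElem?_eq_getElem h]
  rfl

theorem pvGetD_map_succ (l : List Nat) (n : Nat) (h : n < l.length) :
    (l.map (· + 1)).getD n 0 = l.getD n 0 + 1 := by
  rw [List.getD_eq_getElem?_getD, List.getElem?_map, List.getElem?_eq_getElem h,
      List.getD_eq_getElem?_getD, List.getElem?_eq_getElem h]
  rfl

theorem pvFrom_drop (cs : List Char) (h : 0 < (pvP cs).length) :
    cs.drop ((pvP cs).getD 0 0) = pvFrom cs := by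
  induction cs with
  | nil => simp [pvP] at h
  | cons c cs ih =>
    by_cases hc : c = '_'
    · simp [pvP, hc, pvFrom]
    · simp only [pvP, if_neg hc, pvFrom]
      simp only [pvP, if_neg hc, List.length_map] at h
      rw [pvGetD_map_succ _ 0 h, List.drop_succ_cons, ih (by simpa using h)]

theorem pvA_core (n : Nat) (cs : List Char) (h : n + 1 < (pvP cs).length) :
    cs.take ((pvP cs).getD n 0 + 1) ++ cs.drop ((pvP cs).getD (n+1) 0) = pvRem n cs := by
  induction cs generalizing n with
  | nil => simp [pvP] at h
  | cons c cs ih =>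
    by_cases hc : c = '_'
    · subst hc
      have hP : pvP ('_' :: cs) = 0 :: (pvP cs).map (· + 1) := rfl
      rw [hP] at h ⊢
      simp only [List.length_cons, List.length_map] at h
      cases n with
      | zero =>
        have h0 : 0 < (pvP cs).length := by omega
        rw [List.getD_cons_zero, List.getD_cons_succ, pvGetD_map_succ _ 0 h0]
        rw [List.take_succ_cons, List.take_zero, List.drop_succ_cons, pvFrom_drop cs h0]
        rw [show pvRem 0 ('_' :: cs) = '_' :: pvFrom cs from by simp [pvRem]]
        rfl
      | succ m =>
        have h1 : m + 1 < (pvP cs).length := by omega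
        rw [List.getD_cons_succ, List.getD_cons_succ, pvGetD_map_succ _ m (by omega),
            pvGetD_map_succ _ (m+1) h1, List.take_succ_cons, List.drop_succ_cons,
            List.cons_append, ih m h1]
        simp [pvRem]
    · have hP : pvP (c :: cs) = (pvP cs).map (· + 1) := by rw [pvP]; exact if_neg hc
      rw [hP] at h ⊢
      simp only [List.length_map] at h
      cases n with
      | zero =>
        rw [pvGetD_map_succ _ 0 (by omega), pvGetD_map_succ _ 1 (by omega),
            List.take_succ_cons, List.drop_succ_cons, List.cons_append, ih 0 (by omega)]
        simp [pvRem, hc]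
      | succ m =>
        rw [pvGetD_map_succ _ (m+1) (by omega), pvGetD_map_succ _ (m+2) (by omega),
            List.take_succ_cons, List.drop_succ_cons, List.cons_append, ih (m+1) (by omega)]
        simp [pvRem, hc]

theorem pvKeep_ge4 (cs : List Char) (k : Int) (h : 4 ≤ k) : pvKeep k cs = cs := by
  induction cs generalizing k with
  | nil => rfl
  | cons c cs ih =>
    by_cases hc : c = '_'
    · simp only [pvKeep, if_pos hc]
      rw [if_pos (Or.inr hc), ih _ (by omega)]
    · simp only [pvKeep, if_neg hc]
      rw [if_pos (Or.inl (by omega : k ≠ 3)), ih _ h]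

theorem pvKeep3 (cs : List Char) : pvKeep 3 cs = pvFrom cs := by
  induction cs with
  | nil => rfl
  | cons c cs ih =>
    by_cases hc : c = '_'
    · simp [pvKeep, pvFrom, hc, pvKeep_ge4 cs 4 le_rfl]
    · simp [pvKeep, pvFrom, hc, ih]

theorem pvKeep_rem (cs : List Char) (k : Int) (h0 : 0 ≤ k) (h2 : k ≤ 2) :
    pvKeep k cs = pvRem (2 - k.toNat) cs := by
  induction cs generalizing k with
  | nil => cases hn : 2 - k.toNat <;> rfl
  | cons c cs ih =>
    by_cases hc : c = '_'
    · by_cases hk : k = 2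
      · subst hk
        simp [pvKeep, hc, pvKeep3, pvRem]
      · have hcase : 2 - k.toNat = (2 - (k+1).toNat) + 1 := by omega
        rw [hcase]
        simp only [pvKeep, if_pos hc, pvRem]
        have : (k + 1 ≠ 3 ∨ c = '_') := Or.inr hc
        rw [if_pos this, ih (k+1) (by omega) (by omega)]
    · have hne : (k ≠ 3 ∨ c = '_') := Or.inl (by omega)
      cases hcase : 2 - k.toNat with
      | zero =>
        simp only [pvKeep, if_pos hne, pvRem, if_neg hc]
        rw [ih k h0 h2, hcase]
      | succ m =>
        simp only [pvKeep, if_pos hne, pvRem, if_neg hc]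
        rw [ih k h0 h2, hcase]

theorem pvKeep_id (cs : List Char) (k : Int) (h : k + cs.count '_' ≤ 2) (h0 : 0 ≤ k) :
    pvKeep k cs = cs := by
  induction cs generalizing k with
  | nil => rfl
  | cons c cs ih =>
    rw [List.count_cons] at h
    by_cases hc : c = '_'
    · subst hc
      rw [show pvKeep k ('_' :: cs) = '_' :: pvKeep (k + 1) cs from by simp [pvKeep]]
      rw [ih (k + 1) (by simp at h; omega) (by omega)]
    · have hk3 : k ≠ 3 := by
        have : (0 : Int) ≤ cs.count '_' := by positivity
        omega
      rw [show pvKeep k (c :: cs) = c :: pvKeep k cs from by simp [pvKeep, hc, hk3]]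
      rw [ih k (by simp [hc] at h; omega) h0]

theorem pvFoldB (cs : List Char) (acc : List Char) (k : Int) :
    (cs.foldl
      (fun (st : List Char × Int) ch =>
        let seen := if ch = '_' then st.2 + 1 else st.2
        if seen ≠ 3 ∨ ch = '_' then (st.1 ++ [ch], seen) else (st.1, seen))
      (acc, k)).1 = acc ++ pvKeep k cs := by
  induction cs generalizing acc k with
  | nil => simp [pvKeep]
  | cons c cs ih =>
    simp only [List.foldl_cons, pvKeep]
    by_cases hc : c = '_'
    · simp only [if_pos hc]
      by_cases hcond : (k + 1 ≠ 3 ∨ c = '_')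
      · rw [if_pos hcond, if_pos hcond, ih]; simp
      · rw [if_neg hcond, if_neg hcond, ih]
    · simp only [if_neg hc]
      by_cases hcond : (k ≠ 3 ∨ c = '_')
      · rw [if_pos hcond, if_pos hcond, ih]; simp
      · rw [if_neg hcond, if_neg hcond, ih]

theorem pvAlt_eq (s : String) :
    remove_third_underscore_section_alt s = String.ofList (pvRem 2 s.toList) := by
  simp only [remove_third_underscore_section_alt]
  rw [pvFoldB s.toList [] 0, pvKeep_rem s.toList 0 (by omega) (by omega)]
  rfl

theorem pvUps_eq0 (cs : List Char) :
    ((PySem.List.enumerate cs).filter (fun p => p.2 == '_')).map (fun p => p.1)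
      = (pvP cs).map (fun (n : Nat) => (n : Int)) := by
  rw [pvUps_eq cs 0]
  exact List.map_congr_left (fun n _ => by omega)

theorem pvFrom_length_le (cs : List Char) : (pvFrom cs).length ≤ cs.length := by
  induction cs with
  | nil => simp [pvFrom]
  | cons c cs ih => by_cases hc : c = '_' <;> simp [pvFrom, hc]; omega

theorem pvRem_length_le (n : Nat) (cs : List Char) : (pvRem n cs).length ≤ cs.length := by
  induction cs generalizing n with
  | nil => simp [pvRem]
  | cons c cs ih =>
    cases n with
    | zero =>
      by_cases hc : c = '_' <;> simp [pvRem, hc]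
      · exact pvFrom_length_le cs
      · exact ih 0
    | succ m =>
      by_cases hc : c = '_' <;> simp [pvRem, hc]
      · exact ih m
      · exact ih (m+1)

-- A on the ≥3-underscores branch, with positions rewritten to pvP
theorem pvA_branch (s : String) (h3 : 3 ≤ s.toList.count '_') :
    remove_third_underscore_section s =
      String.ofList (PySem.List.slice s.toList none (some (((pvP s.toList).getD 2 0 : Int) + 1)) ++
        PySem.List.slice s.toList
          (if 3 < s.toList.count '_' then some ((pvP s.toList).getD 3 0 : Int) else none) none) := by
  simp only [remove_third_underscore_section]
  rw [pvUps_eq0]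
  have hlen : ((pvP s.toList).map (fun (n : Nat) => (n : Int))).length = s.toList.count '_' := by
    simp [pvP_length]
  rw [if_pos (by omega : 3 ≤ ((pvP s.toList).map (fun (n : Nat) => (n : Int))).length)]
  have hP : s.toList.count '_' = (pvP s.toList).length := (pvP_length s.toList).symm
  have hg2 : PySem.List.pyGetD ((pvP s.toList).map (fun (n : Nat) => (n : Int))) 2 0
      = ((pvP s.toList).getD 2 0 : Int) := by
    rw [show ((2 : Int)) = ((2 : Nat) : Int) by norm_num, PySem.List.pyGetD_natCast]
    exact pvGetD_map_cast _ 2 (by omega)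
  by_cases h4 : 3 < s.toList.count '_'
  · have hg3 : PySem.List.pyGetD ((pvP s.toList).map (fun (n : Nat) => (n : Int))) 3 0
        = ((pvP s.toList).getD 3 0 : Int) := by
      rw [show ((3 : Int)) = ((3 : Nat) : Int) by norm_num, PySem.List.pyGetD_natCast]
      exact pvGetD_map_cast _ 3 (by omega)
    rw [if_pos (by omega : 3 < ((pvP s.toList).map (fun (n : Nat) => (n : Int))).length), if_pos h4,
        hg2, hg3]
  · rw [if_neg (by omega : ¬ 3 < ((pvP s.toList).map (fun (n : Nat) => (n : Int))).length), if_neg h4, hg2]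

-- ===== VERDICT (by name: the statement is the Claim_ definition above) =====
theorem remove_third_underscore_section_spec : Claim_unchanged_remove_third_underscore_section := by
  intro s _ hD
  unfold D_remove_third_underscore_section at hD
  rw [pvAlt_eq]
  by_cases h3 : 3 ≤ s.toList.count '_'
  · have h4 : 3 < s.toList.count '_' := by omega
    rw [pvA_branch s h3, if_pos h4]
    have hP : 2 + 1 < (pvP s.toList).length := by rw [pvP_length]; omega
    have hstart : (((pvP s.toList).getD 2 0 : Int) + 1) = (((pvP s.toList).getD 2 0 + 1 : Nat) : Int) := by
      push_cast; ring
    rw [hstart, PySem.List.slice_to_natCast, PySem.List.slice_from_natCast]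
    rw [pvA_core 2 s.toList (by omega)]
  · simp only [remove_third_underscore_section]
    rw [pvUps_eq0]
    rw [if_neg (by simp [pvP_length]; omega)]
    have hid : pvRem 2 s.toList = s.toList := by
      have h1 := pvKeep_rem s.toList 0 (by omega) (by omega)
      norm_num at h1
      rw [← h1]
      exact pvKeep_id s.toList 0 (by omega) le_rfl
    rw [hid, String.ofList_toList]

theorem remove_third_underscore_section_changed : Claim_changed_remove_third_underscore_section := by
  unfold Claim_changed_remove_third_underscore_section; decide

theorem remove_third_underscore_section_tight : Claim_exact_remove_third_underscore_section := by
  intro s _ hD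
  unfold D_remove_third_underscore_section at hD
  rw [pvAlt_eq, pvA_branch s (by omega), if_neg (by omega)]
  intro hEq
  have hlists := congrArg String.toList hEq
  rw [String.toList_ofList, String.toList_ofList] at hlists
  have hlen := congrArg List.length hlists
  rw [PySem.List.slice_none_none] at hlen
  have hne : s.toList ≠ [] := by
    intro h; rw [h] at hD; simp at hD
  have hlen1 : 1 ≤ s.toList.length := by
    cases h : s.toList with
    | nil => exact absurd h hne
    | cons a l => simp
  have htake : 1 ≤ (PySem.List.slice s.toList none (some (((pvP s.toList).getD 2 0 : Int) + 1))).length := by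
    have : (((pvP s.toList).getD 2 0 : Int) + 1) = (((pvP s.toList).getD 2 0 + 1 : Nat) : Int) := by
      push_cast; ring
    rw [this, PySem.List.slice_to_natCast, List.length_take]
    omega
  have hrem := pvRem_length_le 2 s.toList
  simp only [List.length_append] at hlen
  omega
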